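-- pv_equiv track=rewrite | github.com/Alaayed/CTFSaleh | cp3/topic0/B.py | even_sol
-- ===== SOURCE A (Python) =====
-- def even_sol(n):
--     if n == 2:
--         return "1 2"
--     forward_jumps = n // 2
--     backJumps = n//2 + 1
--     sol = ""
--     cur = n // 2
--     jump_count = 0
--     while jump_count != n-1:
--         sol += f"{cur} "
--         if jump_count % 2 == 0:
--             cur += forward_jumps
--             jump_count += 1
--         else:
--             cur -= backJumps
--             jump_count += 1
--     sol += f'{cur} '
--     return sol
-- ===== SOURCE B (Python) =====
-- def even_sol(n):
--     if n == 2: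
--         return "1 2"
--     f = n // 2
--     return ''.join(f"{(f - i//2) if i % 2 == 0 else (2*f - i//2)} " for i in range(n))
-- ===== Notes on version B (the rewrite author's own statement) =====
-- stated objective: faster
-- what changed: Replaces the stateful while-loop with a running cursor and quadratic string += by a closed-form expression for the i-th term (f - i//2 for even i, 2*f - i//2 for odd i, f = n//2) joined over range(n).
-- outside the precondition, e.g. on even_sol(0): A does not finish within the time limit, B returns ''
import Mathlib
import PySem

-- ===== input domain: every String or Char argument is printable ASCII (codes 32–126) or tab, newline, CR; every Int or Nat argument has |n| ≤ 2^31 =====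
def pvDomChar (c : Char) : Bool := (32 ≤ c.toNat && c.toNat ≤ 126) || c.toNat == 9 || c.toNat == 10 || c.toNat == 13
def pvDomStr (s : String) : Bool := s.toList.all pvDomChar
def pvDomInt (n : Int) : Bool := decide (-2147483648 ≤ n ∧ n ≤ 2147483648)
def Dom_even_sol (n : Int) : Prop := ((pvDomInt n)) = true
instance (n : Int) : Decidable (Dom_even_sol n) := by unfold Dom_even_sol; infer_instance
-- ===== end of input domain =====

-- B replaces A's stateful cursor loop by a closed form for each term, joined over range(n); objective: simpler.

-- ===== PORT A =====
-- fuel = number of loop iterations left; under Pre_ (1 ≤ n) the fuel (n-1).toNat is exact, so the 0-fuel guard is never the reason the loop stops.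
def evenLoopA (n fj bj : Int) : Nat → String → Int → Int → String × Int
  | 0, sol, cur, _jc => (sol, cur)
  | fuel+1, sol, cur, jc =>
    if jc = n - 1 then (sol, cur)
    else
      let sol' := sol ++ PySem.Int.toStr cur ++ " "
      if PySem.Int.mod jc 2 = 0 then
        evenLoopA n fj bj fuel sol' (cur + fj) (jc + 1)
      else
        evenLoopA n fj bj fuel sol' (cur - bj) (jc + 1)

def even_sol (n : Int) : String :=
  if n = 2 then "1 2"
  else
    let forward_jumps := PySem.Int.floordiv n 2
    let backJumps := PySem.Int.floordiv n 2 + 1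
    let r := evenLoopA n forward_jumps backJumps (n - 1).toNat "" (PySem.Int.floordiv n 2) 0
    r.1 ++ PySem.Int.toStr r.2 ++ " "

-- ===== PORT B =====
def even_sol_alt (n : Int) : String :=
  if n = 2 then "1 2"
  else
    let f := PySem.Int.floordiv n 2
    PySem.Str.join "" ((PySem.List.pyRange 0 n 1).map (fun i =>
      PySem.Int.toStr (if PySem.Int.mod i 2 = 0 then f - PySem.Int.floordiv i 2
                       else 2 * f - PySem.Int.floordiv i 2) ++ " "))

-- ===== PRECONDITION & SPEC =====
-- Pre_ excludes n ≤ 0 (and only those): there A's while loop never reaches jump_count = n-1 and diverges.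
def Pre_even_sol (n : Int) : Prop := 1 ≤ n
instance (n : Int) : Decidable (Pre_even_sol n) := by unfold Pre_even_sol; infer_instance
def pvWitness_even_sol : Int := (5)
def Spec_even_sol (n : Int) (out : String) : Prop := out = even_sol_alt n
instance (n : Int) (out : String) : Decidable (Spec_even_sol n out) := by unfold Spec_even_sol; infer_instance

-- ===== CLAIM =====
def Claim_equal_even_sol : Prop := ∀ (n : Int), Dom_even_sol n → Pre_even_sol n → Spec_even_sol n (even_sol n)

-- ===== LEMMAS AND PROOFS =====
-- closed-form value of the cursor just before the i-th emission
def pvVal (n : Int) (i : Nat) : Int :=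
  if i % 2 = 0 then PySem.Int.floordiv n 2 - (i / 2 : Nat)
  else 2 * PySem.Int.floordiv n 2 - (i / 2 : Nat)

def pvTerm (n : Int) (i : Nat) : List Char := PySem.Int.toChars (pvVal n i) ++ [' ']

lemma pvVal_succ (n : Int) (i : Nat) :
    pvVal n (i + 1) =
      if i % 2 = 0 then pvVal n i + PySem.Int.floordiv n 2
      else pvVal n i - (PySem.Int.floordiv n 2 + 1) := by
  unfold pvVal
  rcases Nat.even_or_odd i with h | h
  · have h2 : i % 2 = 0 := Nat.even_iff.mp h
    have h3 : (i + 1) % 2 = 1 := by omega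
    have h4 : (i + 1) / 2 = i / 2 := by omega
    simp [h2, h3, h4]; ring
  · have h2 : i % 2 = 1 := Nat.odd_iff.mp h
    have h3 : (i + 1) % 2 = 0 := by omega
    have h4 : (i + 1) / 2 = i / 2 + 1 := by omega
    simp [h2, h3, h4]; ring

lemma loopA_spec (n : Int) (k : Nat) : ∀ (i : Nat) (sol : String),
    (i : Int) + k = n - 1 →
    (evenLoopA n (PySem.Int.floordiv n 2) (PySem.Int.floordiv n 2 + 1) k sol (pvVal n i) i).1.toList
      = sol.toList ++ (List.range k).flatMap (fun j => pvTerm n (i + j))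
    ∧ (evenLoopA n (PySem.Int.floordiv n 2) (PySem.Int.floordiv n 2 + 1) k sol (pvVal n i) i).2
      = pvVal n (i + k) := by
  induction k with
  | zero => intro i sol _; simp [evenLoopA]
  | succ k ih =>
    intro i sol hik
    have hne : (i : Int) ≠ n - 1 := by push_cast at hik ⊢; omega
    have hmod : PySem.Int.mod (i : Int) 2 = ((i % 2 : Nat) : Int) := PySem.Int.mod_natCast i 2
    have hcast : ((i : Int) + 1) = ((i + 1 : Nat) : Int) := by omega
    have hik2 : ((i + 1 : Nat) : Int) + k = n - 1 := by push_cast at hik ⊢; omega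
    have hshift : (List.range (k + 1)).flatMap (fun j => pvTerm n (i + j))
        = pvTerm n i ++ (List.range k).flatMap (fun j => pvTerm n (i + 1 + j)) := by
      rw [List.range_succ_eq_map]
      simp [List.flatMap_cons, List.flatMap_map]
      exact List.flatMap_congr (fun j _ => by rw [Nat.add_comm j 1, ← Nat.add_assoc])
    rcases Nat.even_or_odd i with h | h
    · have h2 : i % 2 = 0 := Nat.even_iff.mp h
      have hval : pvVal n i + PySem.Int.floordiv n 2 = pvVal n (i + 1) := by
        rw [pvVal_succ, if_pos h2]
      simp only [evenLoopA]
      rw [if_neg hne, hmod, h2]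
      rw [if_pos (by simp)]
      rw [hval, hcast]
      obtain ⟨h1, h22⟩ := ih (i + 1) (sol ++ PySem.Int.toStr (pvVal n i) ++ " ") hik2
      rw [h1, h22]
      refine ⟨?_, by rw [Nat.add_assoc, Nat.add_comm 1 k]⟩
      rw [hshift]
      simp [pvTerm, PySem.Int.toList_toStr]
    · have h2 : i % 2 = 1 := Nat.odd_iff.mp h
      have hval : pvVal n i - (PySem.Int.floordiv n 2 + 1) = pvVal n (i + 1) := by
        rw [pvVal_succ, if_neg (by omega)]
      simp only [evenLoopA]
      rw [if_neg hne, hmod, h2]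
      rw [if_neg (by simp)]
      rw [hval, hcast]
      obtain ⟨h1, h22⟩ := ih (i + 1) (sol ++ PySem.Int.toStr (pvVal n i) ++ " ") hik2
      rw [h1, h22]
      refine ⟨?_, by rw [Nat.add_assoc, Nat.add_comm 1 k]⟩
      rw [hshift]
      simp [pvTerm, PySem.Int.toList_toStr]

lemma join_nil_sep (l : List (List Char)) : PySem.Chars.join [] l = l.flatten := by
  induction l with
  | nil => rw [PySem.Chars.join_nil, List.flatten_nil]
  | cons x xs ih =>
    cases xs with
    | nil => rw [PySem.Chars.join_singleton]; simp
    | cons y ys => rw [PySem.Chars.join_cons_cons, List.flatten_cons, ih]; simp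

lemma alt_toList (n : Int) (hn : 1 ≤ n) (hne2 : n ≠ 2) :
    (even_sol_alt n).toList = (List.range n.toNat).flatMap (fun k => pvTerm n k) := by
  unfold even_sol_alt
  rw [if_neg hne2]
  rw [PySem.Str.toList_join]
  have h0 : ("" : String).toList = [] := rfl
  rw [h0, join_nil_sep]
  rw [PySem.List.pyRange_one]
  have hn0 : (n - 0).toNat = n.toNat := by omega
  rw [hn0, List.map_map, List.map_map, List.flatten_eq_flatMap, List.flatMap_map]
  refine List.flatMap_congr (fun k _ => ?_)
  simp only [Function.comp]
  have hmod : PySem.Int.mod ((0 : Int) + k) 2 = ((k % 2 : Nat) : Int) := by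
    rw [zero_add]; exact PySem.Int.mod_natCast k 2
  have hdiv : PySem.Int.floordiv ((0 : Int) + k) 2 = ((k / 2 : Nat) : Int) := by
    rw [zero_add]; exact PySem.Int.floordiv_natCast k 2
  rw [hmod, hdiv]
  unfold pvTerm pvVal
  rcases Nat.even_or_odd k with h | h
  · have h2 : k % 2 = 0 := Nat.even_iff.mp h
    simp [h2, PySem.Int.toList_toStr]
  · have h2 : k % 2 = 1 := Nat.odd_iff.mp h
    simp [h2, PySem.Int.toList_toStr]

-- ===== VERDICT =====
theorem even_sol_spec : Claim_equal_even_sol := by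
  intro n _hdom hpre
  unfold Spec_even_sol
  have hn : 1 ≤ n := hpre
  by_cases h2 : n = 2
  · unfold even_sol even_sol_alt; rw [if_pos h2, if_pos h2]
  · apply String.toList_inj.mp
    rw [alt_toList n hn h2]
    unfold even_sol
    rw [if_neg h2]
    simp only
    have hm : ((0 : Nat) : Int) + ((n - 1).toNat : Int) = n - 1 := by omega
    obtain ⟨h1, hcur⟩ := loopA_spec n (n - 1).toNat 0 "" hm
    have hval0 : pvVal n 0 = PySem.Int.floordiv n 2 := by unfold pvVal; simp
    simp only [hval0, Nat.cast_zero] at h1 hcur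
    simp only [String.toList_append]
    rw [h1, hcur, PySem.Int.toList_toStr]
    have h0 : ("" : String).toList = [] := rfl
    have hsp : (" " : String).toList = [' '] := rfl
    rw [h0, hsp, List.nil_append]
    have hrange : List.range n.toNat = List.range (n - 1).toNat ++ [(n - 1).toNat] := by
      have h : n.toNat = (n - 1).toNat + 1 := by omega
      rw [h, List.range_succ]
    rw [hrange, List.flatMap_append]
    simp only [List.flatMap_cons, List.flatMap_nil, List.append_nil]
    have hz : (0 : Nat) + (n - 1).toNat = (n - 1).toNat := Nat.zero_add _
    rw [hz]
    have hsame : (List.range (n - 1).toNat).flatMap (fun j => pvTerm n (0 + j))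
        = (List.range (n - 1).toNat).flatMap (fun j => pvTerm n j) :=
      List.flatMap_congr (fun j _ => by rw [Nat.zero_add])
    rw [hsame, List.append_assoc]
    simp [pvTerm]
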